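-- pv_equiv track=rewrite | github.com/fmargul/kryptografia | myapp/add_points.py | find_next_point
-- ===== SOURCE A (Python) =====
-- def find_next_point(a, b, p, x):
--     while True:
--         rhs = (x * x * x + a * x + b) % p
--         y = None
--         for potential_y in range(p):
--             if (potential_y * potential_y) % p == rhs:
--                 y = potential_y
--                 break
--
--         if y is not None:
--             return (x, y)
--
--         x += 1
--         if x >= p:
--             x = 0
-- ===== SOURCE B (Python) =====
-- def find_next_point(a, b, p, x):
--     while True:
--         rhs = (x * x * x + a * x + b) % p
--         # smallest y with y*y % p == rhs, found by scanning the lifts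
--         # rhs, rhs+p, rhs+2p, ... for the first perfect square, with a
--         # square pointer y that only ever moves forward
--         limit = (p - 1) * (p - 1)
--         y = 0
--         target = rhs
--         found = None
--         while target <= limit:
--             while y * y < target:
--                 y += 1
--             if y * y == target:
--                 found = y
--                 break
--             target += p
--         if found is not None:
--             return (x, found)
--         x += 1
--         if x >= p:
--             x = 0
-- ===== Notes on version B (the rewrite author's own statement) =====
-- stated objective: alternative
-- what changed: B finds the smallest square root of rhs by scanning the lifts rhs, rhs+p, rhs+2p, ... for the first perfect square with a square pointer that only moves forward, instead of A's fresh scan of all residues 0..p-1 for every x; Pre_ excludes only inputs where Python A never returns (p = 0 raises ZeroDivisionError; p < 0, or 3 | p with a and b both congruent to 2 mod 3, makes A loop forever since rhs is then never a square mod p).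
import Mathlib
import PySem

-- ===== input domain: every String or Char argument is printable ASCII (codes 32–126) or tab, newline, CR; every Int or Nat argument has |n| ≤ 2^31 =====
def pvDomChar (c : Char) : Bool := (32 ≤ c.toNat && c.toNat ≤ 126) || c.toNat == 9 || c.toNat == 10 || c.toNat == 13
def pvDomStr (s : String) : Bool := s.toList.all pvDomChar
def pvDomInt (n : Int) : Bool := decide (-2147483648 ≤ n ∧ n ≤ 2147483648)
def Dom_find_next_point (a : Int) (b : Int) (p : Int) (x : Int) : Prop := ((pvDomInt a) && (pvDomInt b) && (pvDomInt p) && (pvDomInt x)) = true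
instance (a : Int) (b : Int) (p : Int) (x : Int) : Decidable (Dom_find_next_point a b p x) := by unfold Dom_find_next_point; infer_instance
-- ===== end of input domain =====

-- B replaces A's per-x scan of all residues 0..p-1 for a square root by a scan of the
-- lifts rhs, rhs+p, rhs+2p, … for the first perfect square, recognised by a square
-- pointer that only moves forward (objective: alternative; same worst-case cost).

-- ===== PORT A =====
-- 'for potential_y in range(p): if (potential_y*potential_y) % p == rhs: break' as the
-- obvious early-exit structural recursion on the running index (exact for range(p))
def fnpScanY (p : Int) (rhs : Int) (y : Int) : Option Int :=
  if y < p then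
    if PySem.Int.mod (y * y) p == rhs then some y
    else fnpScanY p rhs (y + 1)
  else none
termination_by (p - y).toNat
decreasing_by omega

-- fuel makes the 'while True' total; inside Pre_ the loop succeeds long before it runs out
def find_next_point_loop (a : Int) (b : Int) (p : Int) : Nat → Int → List Int
  | 0, _ => []
  | fuel + 1, x =>
    let rhs := PySem.Int.mod (x * x * x + a * x + b) p
    match fnpScanY p rhs 0 with
    | some y => [x, y]
    | none =>
      let x' := x + 1
      find_next_point_loop a b p fuel (if p ≤ x' then 0 else x')

def find_next_point (a : Int) (b : Int) (p : Int) (x : Int) : List Int :=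
  find_next_point_loop a b p (x.natAbs + 2 * p.toNat + 2) x

-- ===== PORT B =====
-- termination helper for the square pointer: y ≤ y*y on Int
theorem fnp_le_mul_self (y : Int) : y ≤ y * y := by
  by_cases h : 0 < y
  · nlinarith
  · exact (by omega : y ≤ 0).trans (mul_self_nonneg y)

-- 'while y * y < target: y += 1'
def fnpAdvance (target : Int) (y : Int) : Int :=
  if y * y < target then fnpAdvance target (y + 1) else y
termination_by (target - y).toNat
decreasing_by
  have := fnp_le_mul_self y; omega

-- 'while target <= limit: … target += p', with fuel making the loop total
-- (inside Pre_ the scan ends within p.toNat + 2 rounds, see the lemmas below)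
def fnpKScan (p : Int) (limit : Int) (y : Int) (target : Int) : Nat → Option Int
  | 0 => none
  | fuel + 1 =>
    if target ≤ limit then
      let y' := fnpAdvance target y
      if y' * y' == target then some y'
      else fnpKScan p limit y' (target + p) fuel
    else none

def find_next_point_alt_loop (a : Int) (b : Int) (p : Int) : Nat → Int → List Int
  | 0, _ => []
  | fuel + 1, x =>
    let rhs := PySem.Int.mod (x * x * x + a * x + b) p
    let limit := (p - 1) * (p - 1)
    match fnpKScan p limit 0 rhs (p.toNat + 2) with
    | some y => [x, y]
    | none =>
      let x' := x + 1
      find_next_point_alt_loop a b p fuel (if p ≤ x' then 0 else x')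

def find_next_point_alt (a : Int) (b : Int) (p : Int) (x : Int) : List Int :=
  find_next_point_alt_loop a b p (x.natAbs + 2 * p.toNat + 2) x

-- ===== PRECONDITION & SPEC =====
-- Pre_ excludes exactly the inputs on which Python A never returns a value: p = 0
-- (ZeroDivisionError), p < 0 (infinite loop: no residue 0..p-1 exists), and the mod-3
-- obstruction 3 | p, a ≡ 2, b ≡ 2 (mod 3), under which every rhs ≡ 2 (mod 3) while
-- every square mod p is 0 or 1 mod 3, so A's search never succeeds and loops forever.
def Pre_find_next_point (a : Int) (b : Int) (p : Int) (x : Int) : Prop :=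
  1 ≤ p ∧ ¬((3 : Int) ∣ p ∧ (3 : Int) ∣ (a - 2) ∧ (3 : Int) ∣ (b - 2))
instance (a : Int) (b : Int) (p : Int) (x : Int) : Decidable (Pre_find_next_point a b p x) := by
  unfold Pre_find_next_point; infer_instance

def pvWitness_find_next_point : Int × Int × Int × Int := (0, 1, 3, 0)

def Spec_find_next_point (a : Int) (b : Int) (p : Int) (x : Int) (out : List Int) : Prop := out = find_next_point_alt a b p x
instance (a : Int) (b : Int) (p : Int) (x : Int) (out : List Int) : Decidable (Spec_find_next_point a b p x out) := by unfold Spec_find_next_point; infer_instance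

-- ===== CLAIM (what is proved, stated in full; the proofs are below) =====
def Claim_equal_find_next_point : Prop := ∀ (a : Int) (b : Int) (p : Int) (x : Int), Dom_find_next_point a b p x → Pre_find_next_point a b p x → Spec_find_next_point a b p x (find_next_point a b p x)

-- ===== LEMMAS AND PROOFS =====

-- A's inner scan: none when no index in [j, p) matches
theorem fnp_scanY_eq_none (p rhs : Int) : ∀ n : Nat, ∀ j : Int, (p - j).toNat = n →
    (∀ i : Int, j ≤ i → i < p → ¬ PySem.Int.mod (i * i) p = rhs) →
    fnpScanY p rhs j = none := by
  intro n
  induction n using Nat.strong_induction_on with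
  | _ n ih =>
    intro j hn h
    rw [fnpScanY]
    by_cases hj : j < p
    · rw [if_pos hj, if_neg (by simpa using h j le_rfl hj)]
      exact ih (p - (j + 1)).toNat (by omega) (j + 1) rfl
        (fun i hi hip => h i (by omega) hip)
    · rw [if_neg hj]

-- A's inner scan: the first matching index from j is returned
theorem fnp_scanY_eq_some (p rhs y₀ : Int) : ∀ n : Nat, ∀ j : Int, (p - j).toNat = n →
    j ≤ y₀ → y₀ < p → PySem.Int.mod (y₀ * y₀) p = rhs →
    (∀ i : Int, j ≤ i → i < y₀ → ¬ PySem.Int.mod (i * i) p = rhs) →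
    fnpScanY p rhs j = some y₀ := by
  intro n
  induction n using Nat.strong_induction_on with
  | _ n ih =>
    intro j hn hj0 hy0p hy0 h
    rw [fnpScanY]
    rcases eq_or_lt_of_le hj0 with rfl | hlt
    · rw [if_pos hy0p, if_pos (by simpa using hy0)]
    · rw [if_pos (hj0.trans_lt hy0p), if_neg (by simpa using h j le_rfl hlt)]
      exact ih (p - (j + 1)).toNat (by omega) (j + 1) rfl (by omega) hy0p hy0
        (fun i hi hiy => h i (by omega) hiy)

-- the square pointer: moves to the least z ≥ y with z*z ≥ target
theorem fnp_advance_spec (target : Int) : ∀ n : Nat, ∀ y : Int, (target - y).toNat = n →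
    y ≤ fnpAdvance target y ∧ target ≤ fnpAdvance target y * fnpAdvance target y ∧
      (∀ z : Int, y ≤ z → z < fnpAdvance target y → z * z < target) := by
  intro n
  induction n using Nat.strong_induction_on with
  | _ n ih =>
    intro y hn
    rw [fnpAdvance]
    by_cases hy : y * y < target
    · have hyy := fnp_le_mul_self y
      rw [if_pos hy]
      obtain ⟨h1, h2, h3⟩ := ih (target - (y + 1)).toNat (by omega) (y + 1) rfl
      refine ⟨by omega, h2, ?_⟩
      intro z hz hzlt
      rcases eq_or_lt_of_le hz with rfl | h
      · exact hy
      · exact h3 z (by omega) hzlt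
    · rw [if_neg hy]
      exact ⟨le_rfl, by omega, fun z hz hzlt => absurd hz (by omega)⟩

-- arithmetic: a lift rhs + k*p reduces to rhs mod p
theorem fnp_mod_lift (p rhs k : Int) (hp : 0 < p) (h0 : 0 ≤ rhs) (h1 : rhs < p) :
    PySem.Int.mod (rhs + k * p) p = rhs := by
  rw [PySem.Int.mod_eq_emod_of_pos hp, mul_comm k p, Int.add_mul_emod_self_left, Int.emod_eq_of_lt h0 h1]

-- B's lift scan: none when rhs has no square root mod p
theorem fnp_kscan_none (p rhs : Int) (hp : 1 ≤ p) (h0 : 0 ≤ rhs) (h1 : rhs < p)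
    (hno : ∀ z : Int, 0 ≤ z → z < p → ¬ PySem.Int.mod (z * z) p = rhs) :
    ∀ fuel : Nat, ∀ k y target : Int, target = rhs + k * p → 0 ≤ k → 0 ≤ y →
    fnpKScan p ((p - 1) * (p - 1)) y target fuel = none := by
  intro fuel
  induction fuel with
  | zero => intro k y target _ _ _; rfl
  | succ m ih =>
    intro k y target htar hk hy
    simp only [fnpKScan]
    by_cases hlim : target ≤ (p - 1) * (p - 1)
    · rw [if_pos hlim]
      obtain ⟨h1', h2', h3'⟩ := fnp_advance_spec target (target - y).toNat y rfl
      set y' := fnpAdvance target y with hy'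
      by_cases hsq : y' * y' = target
      · exfalso
        have hy'0 : 0 ≤ y' := le_trans hy h1'
        have hy'p : y' < p := by nlinarith
        exact hno y' hy'0 hy'p (by rw [hsq, htar]; exact fnp_mod_lift p rhs k (by omega) h0 h1)
      · rw [if_neg (by simpa using hsq)]
        exact ih (k + 1) y' (target + p) (by rw [htar]; ring) (by omega) (le_trans hy h1')
    · rw [if_neg hlim]

-- B's lift scan: returns the least square root y₀ of rhs mod p
theorem fnp_kscan_some (p rhs y₀ k₀ : Int) (hp : 1 ≤ p) (h0 : 0 ≤ rhs) (h1 : rhs < p)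
    (hy₀0 : 0 ≤ y₀) (hy₀p : y₀ < p) (hk₀ : y₀ * y₀ = rhs + k₀ * p)
    (hmin : ∀ i : Int, 0 ≤ i → i < y₀ → ¬ PySem.Int.mod (i * i) p = rhs) :
    ∀ fuel : Nat, ∀ k y target : Int, target = rhs + k * p → 0 ≤ k → k ≤ k₀ →
    0 ≤ y → y ≤ y₀ → k₀ - k < (fuel : Int) →
    fnpKScan p ((p - 1) * (p - 1)) y target fuel = some y₀ := by
  intro fuel
  induction fuel with
  | zero =>
    intro k y target _ hk hkk₀ _ _ hfuel
    exfalso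
    simp only [Nat.cast_zero] at hfuel
    omega
  | succ m ih =>
    intro k y target htar hk hkk₀ hy hyy₀ hfuel
    have hy₀sq : y₀ * y₀ ≤ (p - 1) * (p - 1) := by nlinarith
    have htarle : target ≤ y₀ * y₀ := by nlinarith
    simp only [fnpKScan]
    rw [if_pos (le_trans htarle hy₀sq)]
    obtain ⟨h1', h2', h3'⟩ := fnp_advance_spec target (target - y).toNat y rfl
    set y' := fnpAdvance target y with hy'
    have hy'0 : 0 ≤ y' := le_trans hy h1'
    have hy'y₀ : y' ≤ y₀ := by
      by_contra hgt
      exact absurd (h3' y₀ hyy₀ (by omega)) (by omega)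
    by_cases hsq : y' * y' = target
    · have heq : y' = y₀ := by
        rcases eq_or_lt_of_le hy'y₀ with h | h
        · exact h
        · exact absurd (by rw [hsq, htar]; exact fnp_mod_lift p rhs k (by omega) h0 h1)
            (hmin y' hy'0 h)
      rw [if_pos (by simpa using hsq), heq]
    · rw [if_neg (by simpa using hsq)]
      have hkk₀' : k < k₀ := by
        rcases eq_or_lt_of_le hkk₀ with rfl | h
        · exfalso
          have hle : y' * y' ≤ y₀ * y₀ := by nlinarith
          have htt : target = y₀ * y₀ := by rw [htar, hk₀]
          omega
        · exact h
      exact ih (k + 1) y' (target + p) (by rw [htar]; ring) (by omega) (by omega)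
        hy'0 hy'y₀ (by push_cast at hfuel ⊢; omega)

-- the two inner searches agree for p ≥ 1
theorem fnp_inner_eq (p rhs : Int) (hp : 1 ≤ p) (h0 : 0 ≤ rhs) (h1 : rhs < p) :
    fnpKScan p ((p - 1) * (p - 1)) 0 rhs (p.toNat + 2) = fnpScanY p rhs 0 := by
  by_cases hex : ∃ n : Nat, (n : Int) < p ∧ PySem.Int.mod ((n : Int) * (n : Int)) p = rhs
  · classical
    have hspec := Nat.find_spec hex
    set n₀ := Nat.find hex with hn₀def
    set y₀ : Int := (n₀ : Int) with hy₀def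
    have hy₀0 : 0 ≤ y₀ := Int.natCast_nonneg n₀
    have hy₀p : y₀ < p := hspec.1
    have hy₀m : PySem.Int.mod (y₀ * y₀) p = rhs := hspec.2
    have hmin : ∀ i : Int, 0 ≤ i → i < y₀ → ¬ PySem.Int.mod (i * i) p = rhs := by
      intro i hi hlt hmod
      refine Nat.find_min hex (m := i.toNat) (by omega) ⟨?_, ?_⟩ <;>
        rw [Int.toNat_of_nonneg hi]
      · omega
      · exact hmod
    have hp' : (0 : Int) < p := by omega
    have hmod' : y₀ * y₀ % p = rhs := by
      rw [← PySem.Int.mod_eq_emod_of_pos hp']; exact hy₀m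
    have hdiv := Int.mul_ediv_add_emod (y₀ * y₀) p
    rw [hmod'] at hdiv
    set k₀ : Int := y₀ * y₀ / p with hk₀def
    have hk₀ : y₀ * y₀ = rhs + k₀ * p := by rw [mul_comm k₀ p]; omega
    have hk₀0 : 0 ≤ k₀ := Int.ediv_nonneg (mul_self_nonneg y₀) (by omega)
    have hk₀lt : k₀ < p := by nlinarith
    rw [fnp_kscan_some p rhs y₀ k₀ hp h0 h1 hy₀0 hy₀p hk₀ hmin (p.toNat + 2) 0 0 rhs
        (by ring) le_rfl hk₀0 le_rfl hy₀0 (by push_cast; omega),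
      fnp_scanY_eq_some p rhs y₀ (p - 0).toNat 0 rfl hy₀0 hy₀p hy₀m
        (fun i hi hiy => hmin i hi hiy)]
  · have hno : ∀ z : Int, 0 ≤ z → z < p → ¬ PySem.Int.mod (z * z) p = rhs := by
      intro z hz hzp hmod
      refine hex ⟨z.toNat, ?_, ?_⟩ <;> rw [Int.toNat_of_nonneg hz]
      · omega
      · exact hmod
    rw [fnp_kscan_none p rhs hp h0 h1 hno _ 0 0 rhs (by ring) le_rfl le_rfl,
      fnp_scanY_eq_none p rhs (p - 0).toNat 0 rfl (fun i hi hip => hno i hi hip)]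

-- the outer loops agree step for step
theorem fnp_loop_eq (a b p : Int) (hp : 1 ≤ p) :
    ∀ fuel : Nat, ∀ x : Int,
    find_next_point_loop a b p fuel x = find_next_point_alt_loop a b p fuel x := by
  intro fuel
  induction fuel with
  | zero => intro x; rfl
  | succ m ih =>
    intro x
    simp only [find_next_point_loop, find_next_point_alt_loop]
    have hp' : (0 : Int) < p := by omega
    have h0 : 0 ≤ PySem.Int.mod (x * x * x + a * x + b) p := by
      rw [PySem.Int.mod_eq_emod_of_pos hp']; exact Int.emod_nonneg _ (by omega)
    have h1 : PySem.Int.mod (x * x * x + a * x + b) p < p := by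
      rw [PySem.Int.mod_eq_emod_of_pos hp']; exact Int.emod_lt_of_pos _ hp'
    rw [fnp_inner_eq p _ hp h0 h1]
    cases fnpScanY p (PySem.Int.mod (x * x * x + a * x + b) p) 0 with
    | none => exact ih _
    | some y => rfl

-- ===== VERDICT (by name: the statement is the Claim_ definition above) =====
theorem find_next_point_spec : Claim_equal_find_next_point := by
  intro a b p x _ hpre
  unfold Spec_find_next_point find_next_point find_next_point_alt
  exact fnp_loop_eq a b p hpre.1 _ x
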